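-- pv_equiv track=rewrite | github.com/dylansosa/cactus | src/cactus/preprocessor/cutHeaders.py | cut_header
-- ===== SOURCE A (Python) =====
-- def cut_header(header, cutBefore, cutBeforeOcc, cutAfter):
--     if cutBefore:
--         occs = [i for i, c in enumerate(header) if c in cutBefore]
--         if occs:
--             if not cutBeforeOcc:
--                 pos = occs[-1]
--             else:
--                 pos = occs[min(len(occs), cutBeforeOcc) - 1]
--             if pos >= 0:
--                 if pos < len(header) - 1:
--                     header = header[pos + 1:]
--                 else:
--                     header = ""
--     if cutAfter:
--         pos_list = [header.find(c) for c in cutAfter if header.find(c) >= 0]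
--         if pos_list:
--             pos = min(pos_list)
--             header = header[0:pos]
--
--     if not header:
--         raise RuntimeError("Error: applying cutHeaders preprocessor removes entire header: {}".format(seq_record.description))
--
--     return header
-- ===== SOURCE B (Python) =====
-- def cut_header(header, cutBefore, cutBeforeOcc, cutAfter):
--     # Single left-to-right scan that tracks the running match count and last
--     # match position; cutAfter handled by one scan that stops at the first
--     # cut character (instead of per-char find + min).
--     if cutBefore:
--         before = set(cutBefore)
--         seen = 0
--         pos = -1
--         for i, c in enumerate(header):
--             if c in before:
--                 seen += 1
--                 pos = i
--                 if seen == cutBeforeOcc: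
--                     break
--         if pos >= 0:
--             header = header[pos + 1:]
--     after = set(cutAfter)
--     kept = []
--     for c in header:
--         if c in after:
--             break
--         kept.append(c)
--     header = ''.join(kept)
--
--     if not header:
--         raise RuntimeError("Error: applying cutHeaders preprocessor removes entire header: {}".format(seq_record.description))
--
--     return header
-- ===== Notes on version B (the rewrite author's own statement) =====
-- stated objective: simpler
-- what changed: B replaces A's materialized occurrence-index list plus capped subscripting by one left-to-right scan tracking the match count and last match position, and replaces A's per-cutAfter-character find plus min by a single scan that stops at the first character belonging to cutAfter.
-- outside the precondition, e.g. on cut_header('abab', 'a', -1, ''): A returns 'bab', B returns 'b'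
import Mathlib
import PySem

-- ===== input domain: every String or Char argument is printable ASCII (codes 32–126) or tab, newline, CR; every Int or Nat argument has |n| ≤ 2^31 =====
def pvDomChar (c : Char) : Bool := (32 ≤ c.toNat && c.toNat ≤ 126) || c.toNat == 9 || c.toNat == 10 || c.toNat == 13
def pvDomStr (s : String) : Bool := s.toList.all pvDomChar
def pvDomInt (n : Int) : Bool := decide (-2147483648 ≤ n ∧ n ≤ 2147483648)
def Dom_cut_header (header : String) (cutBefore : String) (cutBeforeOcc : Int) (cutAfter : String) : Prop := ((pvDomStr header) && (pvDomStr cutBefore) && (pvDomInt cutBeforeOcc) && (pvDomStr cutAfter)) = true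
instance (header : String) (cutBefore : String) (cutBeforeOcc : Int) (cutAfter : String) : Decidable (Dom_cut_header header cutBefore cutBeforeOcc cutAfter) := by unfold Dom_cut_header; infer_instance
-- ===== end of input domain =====

-- B trims the header with single scans (running match count / stop at first cutAfter char)
-- instead of A's materialized index list and per-character find+min: simpler, same values on Pre_.

-- ===== PORT A =====
-- Python A raises (NameError via the RuntimeError line) when the final header is empty, and
-- raises IndexError / selects by negative index when cutBeforeOcc < 0 meets occurrences:
-- both are outside Pre_; the '.getD 0' default below is never the claimed value there.
def cut_header (header : String) (cutBefore : String) (cutBeforeOcc : Int) (cutAfter : String) : String :=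
  let l := header.toList
  let l1 :=
    if cutBefore ≠ "" then
      let occs : List Int :=
        ((PySem.List.enumerate l).filter (fun p => (cutBefore.toList).contains p.2)).map (fun p => p.1)
      if occs ≠ [] then
        let pos : Int :=
          if cutBeforeOcc = 0 then (PySem.List.pyGet? occs (-1)).getD 0
          else (PySem.List.pyGet? occs (min ((occs.length : Int)) cutBeforeOcc - 1)).getD 0
        if pos ≥ 0 then
          if pos < (l.length : Int) - 1 then PySem.List.slice l (some (pos + 1)) none
          else []
        else l
      else l
    else l
  let l2 :=
    if cutAfter ≠ "" then
      let posList : List Int :=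
        ((cutAfter.toList).filter (fun c => 0 ≤ PySem.Chars.find l1 [c])).map
          (fun c => PySem.Chars.find l1 [c])
      match PySem.List.min? posList (fun x => x) with
      | some pos => PySem.List.slice l1 (some 0) (some pos)
      | none => l1
    else l1
  String.ofList l2

-- ===== PORT B =====
-- one scan: seen = running count of cutBefore matches, pos = last match index; break at the
-- cutBeforeOcc-th match
def bScanPos (before : List Char) (occ : Int) : List Char → Int → Int → Int → Int
  | [], _, _, pos => pos
  | c :: rest, i, seen, pos =>
    if before.contains c then
      if seen + 1 = occ then i
      else bScanPos before occ rest (i + 1) (seen + 1) i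
    else bScanPos before occ rest (i + 1) seen pos

-- one scan: keep characters until the first one belonging to cutAfter
def bTake (after : List Char) : List Char → List Char
  | [] => []
  | c :: rest => if after.contains c then [] else c :: bTake after rest

def cut_header_alt (header : String) (cutBefore : String) (cutBeforeOcc : Int) (cutAfter : String) : String :=
  let l := header.toList
  let l1 :=
    if cutBefore ≠ "" then
      let pos := bScanPos cutBefore.toList cutBeforeOcc l 0 0 (-1)
      if pos ≥ 0 then PySem.List.slice l (some (pos + 1)) none else l
    else l
  String.ofList (bTake cutAfter.toList l1)

-- ===== PRECONDITION & SPEC =====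
-- helpers for Pre_ (declarative description of the cut position; Pre_ never touches the ports)
-- the indices of header positions holding a cutBefore character
def preMatches (l cb : List Char) : List Int :=
  ((List.range l.length).filter (fun i => cb.contains (l.getD i ' '))).map (fun n => (n : Int))

-- the selected entry of an index list: the r-th one, capped at the last (the last if r ≤ 0)
def selIdx (ms : List Int) (d : Int) (r : Int) : Int :=
  if ms = [] then d
  else if 1 ≤ r ∧ r ≤ ms.length then ms[r.toNat - 1]?.getD 0
  else ms.getLast?.getD 0

def preStage1 (l cb : List Char) (occ : Int) : List Char :=
  let p := selIdx (preMatches l cb) (-1) occ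
  if 0 ≤ p then l.drop (p.toNat + 1) else l

-- Pre_ excludes (a) inputs where cutBeforeOcc < 0 meets an occurrence of a cutBefore character
-- (A then raises IndexError or selects by Python negative-index wraparound — an accident of
-- 'occs[min(len(occs), cutBeforeOcc) - 1]'; B caps at the last match), and (b) inputs on which
-- the trimmed header is empty, where Python A raises (NameError: 'seq_record' is undefined on
-- the RuntimeError line) and B raises identically.
def Pre_cut_header (header : String) (cutBefore : String) (cutBeforeOcc : Int) (cutAfter : String) : Prop :=
  (0 ≤ cutBeforeOcc ∨ cutBefore = "" ∨ header.toList.all (fun c => !(cutBefore.toList.contains c)))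
  ∧ (preStage1 header.toList cutBefore.toList cutBeforeOcc).takeWhile
      (fun c => !(cutAfter.toList.contains c)) ≠ []

instance (header : String) (cutBefore : String) (cutBeforeOcc : Int) (cutAfter : String) : Decidable (Pre_cut_header header cutBefore cutBeforeOcc cutAfter) := by unfold Pre_cut_header; infer_instance

def pvWitness_cut_header : String × String × Int × String := ("gi|123|ref ABC", "|", 2, " ")

def Spec_cut_header (header : String) (cutBefore : String) (cutBeforeOcc : Int) (cutAfter : String) (out : String) : Prop := out = cut_header_alt header cutBefore cutBeforeOcc cutAfter
instance (header : String) (cutBefore : String) (cutBeforeOcc : Int) (cutAfter : String) (out : String) : Decidable (Spec_cut_header header cutBefore cutBeforeOcc cutAfter out) := by unfold Spec_cut_header; infer_instance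

-- ===== CLAIM (what is proved, stated in full; the proofs are below) =====
def Claim_equal_cut_header : Prop := ∀ (header : String) (cutBefore : String) (cutBeforeOcc : Int) (cutAfter : String), Dom_cut_header header cutBefore cutBeforeOcc cutAfter → Pre_cut_header header cutBefore cutBeforeOcc cutAfter → Spec_cut_header header cutBefore cutBeforeOcc cutAfter (cut_header header cutBefore cutBeforeOcc cutAfter)

-- ===== LEMMAS AND PROOFS =====

-- proof-side recursive form of the match-index list
def matchIdx (cb : List Char) : List Char → Int → List Int
  | [], _ => []
  | c :: rest, i => if cb.contains c then i :: matchIdx cb rest (i + 1) else matchIdx cb rest (i + 1)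

theorem matchIdx_eq_nil_of_all (cb l : List Char) (i : Int)
    (h : l.all (fun c => !(cb.contains c))) : matchIdx cb l i = [] := by
  induction l generalizing i with
  | nil => rfl
  | cons c rest ih =>
    simp only [List.all_cons, Bool.and_eq_true, Bool.not_eq_true'] at h
    rw [matchIdx, if_neg (by simpa using h.1), ih _ h.2]

theorem matchIdx_mem_lt (cb l : List Char) (i : Int) (m : Int)
    (h : m ∈ matchIdx cb l i) : i ≤ m ∧ m < i + l.length := by
  induction l generalizing i with
  | nil => simp [matchIdx] at h
  | cons c rest ih =>
    rw [List.length_cons]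
    simp only [matchIdx] at h
    split at h
    · rcases List.mem_cons.mp h with rfl | h
      · constructor <;> [omega; (push_cast; omega)]
      · have := ih _ h; push_cast at this ⊢; omega
    · have := ih _ h; push_cast at this ⊢; omega

-- A's occurrence list is matchIdx
theorem occs_eq_matchIdx (cb l : List Char) (i : Int) :
    ((PySem.List.enumerate l i).filter (fun p => cb.contains p.2)).map (fun p => p.1)
      = matchIdx cb l i := by
  induction l generalizing i with
  | nil => simp [PySem.List.enumerate_nil, matchIdx]
  | cons c rest ih =>
    rw [PySem.List.enumerate_cons, matchIdx]
    by_cases hc : cb.contains c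
    · rw [if_pos (by simpa using hc), List.filter_cons_of_pos (by simpa using hc),
        List.map_cons, ih]
    · rw [if_neg (by simpa using hc), List.filter_cons_of_neg (by simpa using hc), ih]

theorem selIdx_cons (m : Int) (ms : List Int) (pos : Int) (r : Int) (hr : r ≠ 1) :
    selIdx (m :: ms) pos r = selIdx ms m (r - 1) := by
  cases ms with
  | nil =>
    simp only [selIdx, List.cons_ne_nil, ite_false, ite_true, List.length_cons, List.length_nil]
    split_ifs with h1
    · exfalso; push_cast at h1; omega
    · simp
  | cons a t =>
    simp only [selIdx, List.cons_ne_nil, ite_false, List.length_cons]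
    split_ifs with h1 h2 h2
    · have hk : r.toNat - 1 = ((r - 1).toNat - 1) + 1 := by
        rcases h2 with ⟨h2a, _⟩; omega
      rw [hk, List.getElem?_cons_succ]
    · exfalso; push_cast at h1 h2; omega
    · exfalso; push_cast at h1 h2; omega
    · rw [List.getLast?_cons_cons]

-- B's scan computes selIdx of the match-index list
theorem selIdx_cons_one (m : Int) (ms : List Int) (pos : Int) :
    selIdx (m :: ms) pos 1 = m := by
  simp only [selIdx, List.cons_ne_nil, ite_false, List.length_cons]
  rw [if_pos ⟨le_refl 1, by push_cast; omega⟩]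
  simp

theorem bScan_spec (cb : List Char) (occ : Int) (l : List Char) (i : Int) (seen pos : Int) :
    bScanPos cb occ l i seen pos = selIdx (matchIdx cb l i) pos (occ - seen) := by
  induction l generalizing i seen pos with
  | nil => simp [bScanPos, matchIdx, selIdx]
  | cons c rest ih =>
    by_cases hc : cb.contains c
    · simp only [bScanPos, matchIdx, hc, ite_true]
      by_cases hb : seen + 1 = occ
      · have hr1 : occ - seen = 1 := by omega
        rw [if_pos hb, hr1, selIdx_cons_one]
      · rw [if_neg hb, ih, selIdx_cons _ _ _ _ (by omega),
          show occ - seen - 1 = occ - (seen + 1) by omega]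
    · simp only [bScanPos, matchIdx, hc]
      exact ih _ _ _

-- cutAfter stage: find+min equals the first-cut-character scan
theorem singleton_prefix_iff (c : Char) (s : List Char) :
    [c] <+: s ↔ ∃ t, s = c :: t := by
  constructor
  · rintro ⟨t, rfl⟩; exact ⟨t, rfl⟩
  · rintro ⟨t, rfl⟩; exact ⟨t, rfl⟩

theorem singleton_infix_iff (c : Char) (s : List Char) :
    [c] <:+: s ↔ c ∈ s := by
  constructor
  · intro h; exact h.subset (List.mem_singleton_self c)
  · intro h
    rcases List.append_of_mem h with ⟨pre, suf, rfl⟩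
    exact ⟨pre, suf, by simp⟩

theorem find_singleton_nil (c : Char) : PySem.Chars.find [] [c] = -1 := by
  rw [PySem.Chars.find_eq_neg_one_iff]
  simp

theorem find_singleton_cons_self (c : Char) (l : List Char) :
    PySem.Chars.find (c :: l) [c] = 0 := by
  have hmem : [c] <:+: (c :: l) := (singleton_infix_iff c _).mpr (List.mem_cons_self)
  have h0 : 0 ≤ PySem.Chars.find (c :: l) [c] := (PySem.Chars.find_nonneg_iff _ _).mpr hmem
  rcases PySem.Chars.find_spec h0 with ⟨_, hmin⟩
  by_contra hne
  have hpos : 0 < (PySem.Chars.find (c :: l) [c]).toNat := by omega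
  exact hmin 0 hpos ⟨l, rfl⟩

theorem find_singleton_cons_ne (x c : Char) (l : List Char) (hx : x ≠ c) :
    PySem.Chars.find (x :: l) [c] =
      if PySem.Chars.find l [c] = -1 then -1 else 1 + PySem.Chars.find l [c] := by
  by_cases hm : c ∈ l
  · have hfl : 0 ≤ PySem.Chars.find l [c] := (PySem.Chars.find_nonneg_iff _ _).mpr ((singleton_infix_iff c l).mpr hm)
    have hgl : 0 ≤ PySem.Chars.find (x :: l) [c] :=
      (PySem.Chars.find_nonneg_iff _ _).mpr ((singleton_infix_iff c _).mpr (List.mem_cons_of_mem x hm))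
    rcases PySem.Chars.find_spec hfl with ⟨hfpre, hfmin⟩
    rcases PySem.Chars.find_spec hgl with ⟨hgpre, hgmin⟩
    set f := PySem.Chars.find l [c] with hf
    set g := PySem.Chars.find (x :: l) [c] with hg
    have hgpos : 0 < g.toNat := by
      by_contra h0
      have : g.toNat = 0 := by omega
      rw [this] at hgpre
      rcases (singleton_prefix_iff c _).mp hgpre with ⟨t, ht⟩
      simp at ht
      exact hx ht.1
    -- [c] <+: l.drop (g.toNat - 1)
    have h1 : [c] <+: l.drop (g.toNat - 1) := by
      have : (x :: l).drop g.toNat = l.drop (g.toNat - 1) := by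
        cases hgt : g.toNat with
        | zero => omega
        | succ k => simp [List.drop_succ_cons]
      rwa [this] at hgpre
    have h2 : [c] <+: (x :: l).drop (f.toNat + 1) := by
      rwa [List.drop_succ_cons]
    have le1 : ¬ (g.toNat - 1 < f.toNat) := fun h => hfmin _ h h1
    have le2 : ¬ (f.toNat + 1 < g.toNat) := fun h => hgmin _ h h2
    rw [if_neg (by omega)]
    omega
  · have h1 : PySem.Chars.find l [c] = -1 := by
      rw [PySem.Chars.find_eq_neg_one_iff]; simp [singleton_infix_iff, hm]
    have h2 : PySem.Chars.find (x :: l) [c] = -1 := by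
      rw [PySem.Chars.find_eq_neg_one_iff]
      simp [singleton_infix_iff]
      exact ⟨fun h => hx h.symm, hm⟩
    rw [h1, h2, if_pos rfl]

theorem foldl_min_map_add_one (t : List Int) (x : Int) :
    (t.map (fun z => 1 + z)).foldl min (1 + x) = 1 + t.foldl min x := by
  induction t generalizing x with
  | nil => rfl
  | cons a s ih =>
    rw [List.map_cons, List.foldl_cons, List.foldl_cons,
      show min (1 + x) (1 + a) = 1 + min x a by omega, ih]

theorem min?_map_add_one (xs : List Int) :
    PySem.List.min? (xs.map (fun z => 1 + z)) (fun x => x)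
      = (PySem.List.min? xs (fun x => x)).map (fun z => 1 + z) := by
  cases xs with
  | nil => simp [PySem.List.min?]
  | cons a t =>
    rw [List.map_cons, PySem.List.min?_id_cons, PySem.List.min?_id_cons]
    simp [foldl_min_map_add_one]

theorem posList_mem_nonneg (ca l : List Char) (m : Int)
    (h : m ∈ (ca.filter (fun c => 0 ≤ PySem.Chars.find l [c])).map
        (fun c => PySem.Chars.find l [c])) : 0 ≤ m := by
  rcases List.mem_map.mp h with ⟨c, hc, rfl⟩
  rcases List.mem_filter.mp hc with ⟨-, hcond⟩
  simpa using hcond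

theorem stage2_eq (ca l : List Char) :
    (match PySem.List.min? (((ca.filter (fun c => 0 ≤ PySem.Chars.find l [c])).map
        (fun c => PySem.Chars.find l [c]))) (fun x => x) with
      | some pos => PySem.List.slice l (some 0) (some pos)
      | none => l) = bTake ca l := by
  induction l with
  | nil =>
    have : (ca.filter (fun c => 0 ≤ PySem.Chars.find ([] : List Char) [c])) = [] := by
      apply List.filter_eq_nil_iff.mpr
      intro c _
      simp [find_singleton_nil]
    simp [this, PySem.List.min?, bTake]
  | cons x rest ih =>
    by_cases hca : ca.contains x
    · -- first char is cut: result is []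
      have hx : x ∈ ca := by simpa using hca
      have h0mem : (0 : Int) ∈ (ca.filter (fun c => 0 ≤ PySem.Chars.find (x :: rest) [c])).map
          (fun c => PySem.Chars.find (x :: rest) [c]) := by
        apply List.mem_map.mpr
        refine ⟨x, List.mem_filter.mpr ⟨hx, by simp [find_singleton_cons_self]⟩, ?_⟩
        exact find_singleton_cons_self x rest
      obtain ⟨m, hm⟩ : ∃ m, PySem.List.min? ((ca.filter (fun c => 0 ≤ PySem.Chars.find (x :: rest) [c])).map
          (fun c => PySem.Chars.find (x :: rest) [c])) (fun x => x) = some m := by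
        cases hmin : PySem.List.min? ((ca.filter (fun c => 0 ≤ PySem.Chars.find (x :: rest) [c])).map
            (fun c => PySem.Chars.find (x :: rest) [c])) (fun y => y) with
        | none =>
          rw [PySem.List.min?_eq_none_iff] at hmin
          rw [hmin] at h0mem
          simp at h0mem
        | some m => exact ⟨m, rfl⟩
      have hmem := PySem.List.min?_mem hm
      have hge : 0 ≤ m := posList_mem_nonneg _ _ _ hmem
      have hle : m ≤ 0 := PySem.List.min?_isMin hm 0 h0mem
      have hm0 : m = 0 := le_antisymm hle hge
      rw [hm, hm0]
      simp only [PySem.List.slice_zero_start]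
      rw [PySem.List.slice_to (x :: rest) (le_refl (0:Int))]
      simp [bTake, hx]
    · -- first char kept
      have hxn : x ∉ ca := by simpa using hca
      have hfilter : (ca.filter (fun c => 0 ≤ PySem.Chars.find (x :: rest) [c]))
          = (ca.filter (fun c => 0 ≤ PySem.Chars.find rest [c])) := by
        apply List.filter_congr
        intro c hc
        have hne : x ≠ c := fun h => hxn (h ▸ hc)
        rw [find_singleton_cons_ne x c rest hne]
        have hb := PySem.Chars.neg_one_le_find rest [c]
        by_cases hf : PySem.Chars.find rest [c] = -1
        · simp [hf]
        · rw [if_neg hf]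
          simp only [decide_eq_decide]
          omega
      have hmap : (ca.filter (fun c => 0 ≤ PySem.Chars.find rest [c])).map
            (fun c => PySem.Chars.find (x :: rest) [c])
          = ((ca.filter (fun c => 0 ≤ PySem.Chars.find rest [c])).map
            (fun c => PySem.Chars.find rest [c])).map (fun z => 1 + z) := by
        rw [List.map_map]
        apply List.map_congr_left
        intro c hc
        rcases List.mem_filter.mp hc with ⟨hcmem, hcond⟩
        have hne : x ≠ c := fun h => hxn (h ▸ hcmem)
        rw [find_singleton_cons_ne x c rest hne]
        have hcond' : 0 ≤ PySem.Chars.find rest [c] := by simpa using hcond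
        rw [if_neg (by omega)]
        rfl
      rw [hfilter, hmap, min?_map_add_one]
      cases hmin : PySem.List.min? ((ca.filter (fun c => 0 ≤ PySem.Chars.find rest [c])).map
          (fun c => PySem.Chars.find rest [c])) (fun x => x) with
      | none =>
        rw [hmin] at ih
        simp only [Option.map_none]
        have ih' : rest = bTake ca rest := by simpa using ih
        show x :: rest = bTake ca (x :: rest)
        rw [bTake, if_neg (by simpa using hca), ← ih']
      | some m =>
        rw [hmin] at ih
        have hge : 0 ≤ m := posList_mem_nonneg _ _ _ (PySem.List.min?_mem hmin)
        have ih' : PySem.List.slice rest none (some m) = bTake ca rest := by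
          simpa [PySem.List.slice_zero_start] using ih
        have hslice : PySem.List.slice (x :: rest) none (some (1 + m))
            = x :: PySem.List.slice rest none (some m) := by
          rw [PySem.List.slice_to (x :: rest) (by omega : (0:Int) ≤ 1 + m), PySem.List.slice_to rest hge,
            show (1 + m).toNat = m.toNat + 1 by omega, List.take_succ_cons]
        simp only [Option.map_some, PySem.List.slice_zero_start]
        rw [hslice, ih', bTake, if_neg (by simpa using hca)]

theorem bTake_nil_ca (l : List Char) : bTake [] l = l := by
  induction l with
  | nil => rfl
  | cons c rest ih => simp [bTake, ih]


theorem selIdx_mem (ms : List Int) (d r : Int) (h : ms ≠ []) : selIdx ms d r ∈ ms := by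
  rw [selIdx, if_neg h]
  split_ifs with h1
  · have hlt : r.toNat - 1 < ms.length := by
      rcases h1 with ⟨ha, hb⟩
      have : 0 < ms.length := List.length_pos_iff.mpr h
      omega
    rw [List.getElem?_eq_getElem hlt]
    exact List.getElem_mem hlt
  · rw [List.getLast?_eq_some_getLast h, Option.getD_some]
    exact List.getLast_mem h

theorem posA_eq_selIdx (ms : List Int) (occ : Int) (h0 : 0 ≤ occ) (hne : ms ≠ []) :
    (if occ = 0 then (PySem.List.pyGet? ms (-1)).getD 0
     else (PySem.List.pyGet? ms (min ((ms.length : Int)) occ - 1)).getD 0)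
      = selIdx ms (-1) occ := by
  have hlen : 0 < ms.length := List.length_pos_iff.mpr hne
  by_cases hz : occ = 0
  · rw [if_pos hz, PySem.List.pyGet?_neg_one, selIdx, if_neg hne, if_neg (by omega)]
  · rw [if_neg hz]
    have h1 : 1 ≤ occ := by omega
    by_cases hle : occ ≤ (ms.length : Int)
    · have he : min ((ms.length : Int)) occ - 1 = occ - 1 := by omega
      rw [he, PySem.List.pyGet?_of_nonneg ms (by omega)]
      rw [selIdx, if_neg hne, if_pos ⟨h1, hle⟩]
      rw [show (occ - 1).toNat = occ.toNat - 1 by omega]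
    · have he : min ((ms.length : Int)) occ - 1 = (ms.length : Int) - 1 := by omega
      rw [he, PySem.List.pyGet?_of_nonneg ms (by omega)]
      rw [selIdx, if_neg hne, if_neg (by omega)]
      have : ((ms.length : Int) - 1).toNat = ms.length - 1 := by omega
      rw [this, List.getLast?_eq_getElem?]


theorem stage1_core (l : List Char) (ms : List Int) (occ : Int)
    (hms : ∀ m ∈ ms, 0 ≤ m ∧ m < (l.length : Int))
    (hocc : 0 ≤ occ ∨ ms = []) :
    (if ms ≠ [] then
        if (if occ = 0 then (PySem.List.pyGet? ms (-1)).getD 0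
            else (PySem.List.pyGet? ms (min ((ms.length : Int)) occ - 1)).getD 0) ≥ 0 then
          if (if occ = 0 then (PySem.List.pyGet? ms (-1)).getD 0
              else (PySem.List.pyGet? ms (min ((ms.length : Int)) occ - 1)).getD 0)
              < (l.length : Int) - 1 then
            PySem.List.slice l
              (some ((if occ = 0 then (PySem.List.pyGet? ms (-1)).getD 0
                else (PySem.List.pyGet? ms (min ((ms.length : Int)) occ - 1)).getD 0) + 1)) none
          else []
        else l
      else l)
    = (if selIdx ms (-1) occ ≥ 0 then
        PySem.List.slice l (some (selIdx ms (-1) occ + 1)) none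
      else l) := by
  by_cases hne : ms = []
  · rw [if_neg (by simp [hne]), selIdx, if_pos hne, if_neg (by omega)]
  · have h0 : 0 ≤ occ := hocc.resolve_right hne
    rw [if_pos hne, posA_eq_selIdx ms occ h0 hne]
    have hp : selIdx ms (-1) occ ∈ ms := selIdx_mem ms (-1) occ hne
    obtain ⟨hp0, hpl⟩ := hms _ hp
    rw [if_pos (by omega : selIdx ms (-1) occ ≥ 0), if_pos (by omega : selIdx ms (-1) occ ≥ 0)]
    by_cases hlt : selIdx ms (-1) occ < (l.length : Int) - 1
    · rw [if_pos hlt]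
    · rw [if_neg hlt, PySem.List.slice_from l (by omega : (0:Int) ≤ selIdx ms (-1) occ + 1)]
      have hL : (selIdx ms (-1) occ + 1).toNat = l.length := by omega
      rw [hL, List.drop_length]

theorem stage2_full (ca : String) (L : List Char) :
    (if ca ≠ "" then
        match PySem.List.min? (((ca.toList.filter (fun c => 0 ≤ PySem.Chars.find L [c])).map
            (fun c => PySem.Chars.find L [c]))) (fun x => x) with
        | some pos => PySem.List.slice L (some 0) (some pos)
        | none => L
      else L) = bTake ca.toList L := by
  by_cases hca : ca = ""
  · rw [if_neg (by simp [hca]), hca]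
    exact (bTake_nil_ca L).symm
  · rw [if_pos hca]
    exact stage2_eq ca.toList L

-- ===== VERDICT (by name: the statement is the Claim_ definition above) =====
theorem cut_header_spec : Claim_equal_cut_header := by
  unfold Claim_equal_cut_header Spec_cut_header
  intro header cutBefore occ cutAfter _ hpre
  rcases hpre with ⟨hocc, -⟩
  simp only [cut_header, cut_header_alt]
  rw [occs_eq_matchIdx cutBefore.toList header.toList 0,
    bScan_spec cutBefore.toList occ header.toList 0 0 (-1), sub_zero]
  by_cases hcb : cutBefore = ""
  · rw [if_neg (show ¬(cutBefore ≠ "") from by simp [hcb])]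
    rw [if_neg (show ¬(cutBefore ≠ "") from by simp [hcb])]
    rw [stage2_full]
  · rw [if_pos (show cutBefore ≠ "" from hcb)]
    rw [if_pos (show cutBefore ≠ "" from hcb)]
    have hms : ∀ m ∈ matchIdx cutBefore.toList header.toList 0, 0 ≤ m ∧ m < (header.toList.length : Int) := by
      intro m hm
      have := matchIdx_mem_lt cutBefore.toList header.toList 0 m hm
      omega
    have hocc2 : 0 ≤ occ ∨ matchIdx cutBefore.toList header.toList 0 = [] := by
      rcases hocc with h | h | h
      · exact Or.inl h
      · exact absurd h hcb
      · exact Or.inr (matchIdx_eq_nil_of_all _ _ _ h)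
    rw [stage1_core header.toList (matchIdx cutBefore.toList header.toList 0) occ hms hocc2,
      stage2_full]
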